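-- pv_equiv track=rewrite | github.com/Core-Creates/C-H-A-R-L-O-T-T-E | plugins/intell/google_dorks/ghbd/ghdb_linker.py | format_grouped_results_as_strings
-- ===== SOURCE A (Python) =====
-- from typing import Any
--
-- def _collapse_ws(s: str) -> str:
--     return " ".join((s or "").split())
--
-- def _clamp(s: str, max_len: int) -> str:
--     s = s or ""
--     return s if len(s) <= max_len else (s[: max_len - 1] + "…")
--
-- def _format_row_as_string(r: dict[str, Any], max_len: int = 120) -> str:
--     d = _collapse_ws(r.get("dork") or "")
--     t = _collapse_ws(r.get("title") or "")
--     s = f"{d}  —  {t}" if (d and t) else (d or t or "")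
--     return _clamp(s, max_len)
--
-- def format_grouped_results_as_strings(
--     grouped: dict[str, list[dict[str, Any]]],
--     max_items_per_port: int = 10,
--     max_line_len: int = 120,
-- ) -> dict[str, list[str]]:
--     out: dict[str, list[str]] = {}
--     for key, rows in grouped.items():
--         strings, seen = [], set()
--         for r in rows:
--             s = _format_row_as_string(r, max_len=max_line_len)
--             if s not in seen:
--                 strings.append(s)
--                 seen.add(s)
--             if len(strings) >= max_items_per_port:
--                 break
--         out[key] = strings
--     return out
-- ===== SOURCE B (Python) =====
-- from typing import Any
--
--
-- def _collapse_ws(s: str) -> str: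
--     return " ".join((s or "").split())
--
--
-- def _clamp(s: str, max_len: int) -> str:
--     s = s or ""
--     return s if len(s) <= max_len else (s[: max_len - 1] + "…")
--
--
-- def _format_row_as_string(r: dict[str, Any], max_len: int = 120) -> str:
--     d = _collapse_ws(r.get("dork") or "")
--     t = _collapse_ws(r.get("title") or "")
--     s = f"{d}  —  {t}" if (d and t) else (d or t or "")
--     return _clamp(s, max_len)
--
--
-- def format_grouped_results_as_strings(
--     grouped: dict[str, list[dict[str, Any]]],
--     max_items_per_port: int = 10,
--     max_line_len: int = 120,
-- ) -> dict[str, list[str]]: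
--     # Sieve-style selection: repeatedly take the first pending string and purge
--     # every duplicate of it from the remainder -- no seen-set is maintained.
--     out: dict[str, list[str]] = {}
--     for key, rows in grouped.items():
--         pending = [_format_row_as_string(r, max_len=max_line_len) for r in rows]
--         picked: list[str] = []
--         while pending and len(picked) < max_items_per_port:
--             head = pending[0]
--             picked.append(head)
--             pending = [x for x in pending[1:] if x != head]
--         out[key] = picked
--     return out
-- ===== Notes on version B (the rewrite author's own statement) =====
-- stated objective: alternative
-- what changed: B replaces A's seen-set accumulator with a sieve: it formats all rows first, then repeatedly takes the head of the pending list and filters every duplicate of it out of the remainder until the cap is reached, so no auxiliary membership structure exists at all.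
-- intended difference: When max_items_per_port <= 0 and some key has a nonempty row list, A still returns one formatted item per such key (its break check runs only after appending), while B returns an empty list for every key, which is the intended meaning of a non-positive item limit. — e.g. on format_grouped_results_as_strings([("80", [[("dork", "x")]])], 0, 120): A returns [("80", ["x"])], B returns [("80", [])]
import Mathlib
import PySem

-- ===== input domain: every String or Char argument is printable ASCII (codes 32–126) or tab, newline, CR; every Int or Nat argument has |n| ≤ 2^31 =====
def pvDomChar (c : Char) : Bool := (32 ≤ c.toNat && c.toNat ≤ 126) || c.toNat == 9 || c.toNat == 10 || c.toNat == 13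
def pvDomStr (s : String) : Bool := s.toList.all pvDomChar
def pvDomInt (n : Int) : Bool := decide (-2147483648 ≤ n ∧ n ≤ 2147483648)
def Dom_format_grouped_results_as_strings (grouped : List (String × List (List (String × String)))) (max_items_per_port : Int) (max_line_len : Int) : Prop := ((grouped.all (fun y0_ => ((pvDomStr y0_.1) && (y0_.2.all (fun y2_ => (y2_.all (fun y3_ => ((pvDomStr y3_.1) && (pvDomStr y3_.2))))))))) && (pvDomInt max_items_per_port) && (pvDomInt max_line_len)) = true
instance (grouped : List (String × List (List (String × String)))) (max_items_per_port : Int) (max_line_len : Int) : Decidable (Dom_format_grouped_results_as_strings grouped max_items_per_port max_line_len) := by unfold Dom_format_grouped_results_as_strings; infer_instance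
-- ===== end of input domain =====

-- B replaces A's seen-set accumulator with a sieve: format all rows, then repeatedly take
-- the head of the pending list and filter its duplicates out of the remainder until the
-- cap is reached (objective: alternative). Intended difference (see D_ below): for
-- max_items_per_port ≤ 0, A still emits one item per key with rows, B emits none.

-- ===== PORT A =====
-- _collapse_ws(s): " ".join(s.split())  ('(s or "")' is value-equal to s for a string s)
def pvCollapseWs (s : String) : String :=
  PySem.Str.join " " (PySem.Str.split₀ s)

-- _clamp(s, max_len)
def pvClamp (s : String) (max_len : Int) : String :=
  if PySem.Str.len s ≤ max_len then s
  else PySem.Str.slice s none (some (max_len - 1)) ++ "…"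

-- _format_row_as_string(r, max_len)  ('x or ""' on an Optional[str] is getD "")
def pvFormatRow (r : List (String × String)) (max_len : Int) : String :=
  let d := pvCollapseWs (((PySem.Dict.ofList r).get? "dork").getD "")
  let t := pvCollapseWs (((PySem.Dict.ofList r).get? "title").getD "")
  let s := if d ≠ "" ∧ t ≠ "" then d ++ "  —  " ++ t
           else if d ≠ "" then d else if t ≠ "" then t else ""
  pvClamp s max_len

-- the inner 'for r in rows' loop of A, with its set, its append and its post-append break
def pvALoop (max_items_per_port max_line_len : Int) (rows : List (List (String × String)))
    (strings : List String) (seen : PySem.Set String) : List String :=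
  match rows with
  | [] => strings
  | r :: rest =>
    let s := pvFormatRow r max_line_len
    let p := if !PySem.Set.contains seen s then (strings ++ [s], PySem.Set.add seen s)
             else (strings, seen)
    if max_items_per_port ≤ (p.1.length : Int) then p.1
    else pvALoop max_items_per_port max_line_len rest p.1 p.2

def format_grouped_results_as_strings (grouped : List (String × List (List (String × String)))) (max_items_per_port : Int) (max_line_len : Int) : List (String × List String) :=
  (grouped.foldl
    (fun out kv => PySem.Dict.insert out kv.1
      (pvALoop max_items_per_port max_line_len kv.2 [] PySem.Set.empty))
    PySem.Dict.empty).items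

-- ===== PORT B =====
-- B's while loop: while pending and len(picked) < k: pick head, filter it out of the rest
-- (fuel = pending.length bounds the iteration count: filtering never grows the list)
def pvBLoopF (fuel : Nat) (k : Int) (picked pending : List String) : List String :=
  match fuel, pending with
  | _, [] => picked
  | 0, _ :: _ => picked
  | fuel + 1, h :: t =>
    if (picked.length : Int) < k then
      pvBLoopF fuel k (picked ++ [h]) (t.filter (fun x => x ≠ h))
    else picked

def pvBLoop (k : Int) (picked pending : List String) : List String :=
  pvBLoopF pending.length k picked pending

def format_grouped_results_as_strings_alt (grouped : List (String × List (List (String × String)))) (max_items_per_port : Int) (max_line_len : Int) : List (String × List String) :=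
  (grouped.foldl
    (fun out kv => PySem.Dict.insert out kv.1
      (pvBLoop max_items_per_port [] (kv.2.map (fun r => pvFormatRow r max_line_len))))
    PySem.Dict.empty).items

-- ===== PRECONDITION & SPEC =====
-- When max_items_per_port ≤ 0 and some key has a nonempty row list, A still returns one
-- formatted item for each such key (its break check runs only after appending), while B
-- returns an empty list for every key, the intended meaning of a non-positive item limit.
def D_format_grouped_results_as_strings (grouped : List (String × List (List (String × String)))) (max_items_per_port : Int) (max_line_len : Int) : Prop :=
  max_items_per_port ≤ 0 ∧ ∃ kv ∈ grouped, kv.2 ≠ []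
instance (grouped : List (String × List (List (String × String)))) (max_items_per_port : Int) (max_line_len : Int) : Decidable (D_format_grouped_results_as_strings grouped max_items_per_port max_line_len) := by unfold D_format_grouped_results_as_strings; infer_instance

def Spec_format_grouped_results_as_strings (grouped : List (String × List (List (String × String)))) (max_items_per_port : Int) (max_line_len : Int) (out : List (String × List String)) : Prop := ¬ D_format_grouped_results_as_strings grouped max_items_per_port max_line_len → out = format_grouped_results_as_strings_alt grouped max_items_per_port max_line_len
instance (grouped : List (String × List (List (String × String)))) (max_items_per_port : Int) (max_line_len : Int) (out : List (String × List String)) : Decidable (Spec_format_grouped_results_as_strings grouped max_items_per_port max_line_len out) := by unfold Spec_format_grouped_results_as_strings; infer_instance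

def pvDiffWitness_format_grouped_results_as_strings : (List (String × List (List (String × String)))) × Int × Int :=
  ([("80", [[("dork", "x")]])], 0, 120)
def pvDiffWitnessOut_format_grouped_results_as_strings : (List (String × List String)) × (List (String × List String)) :=
  ([("80", ["x"])], [("80", [])])

-- ===== CLAIM (what is proved, stated in full; the proofs are below) =====
def Claim_unchanged_format_grouped_results_as_strings : Prop := ∀ (grouped : List (String × List (List (String × String)))) (max_items_per_port : Int) (max_line_len : Int), Dom_format_grouped_results_as_strings grouped max_items_per_port max_line_len → Spec_format_grouped_results_as_strings grouped max_items_per_port max_line_len (format_grouped_results_as_strings grouped max_items_per_port max_line_len)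
def Claim_changed_format_grouped_results_as_strings : Prop := Dom_format_grouped_results_as_strings (pvDiffWitness_format_grouped_results_as_strings.1) (pvDiffWitness_format_grouped_results_as_strings.2.1) (pvDiffWitness_format_grouped_results_as_strings.2.2) ∧ D_format_grouped_results_as_strings (pvDiffWitness_format_grouped_results_as_strings.1) (pvDiffWitness_format_grouped_results_as_strings.2.1) (pvDiffWitness_format_grouped_results_as_strings.2.2) ∧ format_grouped_results_as_strings (pvDiffWitness_format_grouped_results_as_strings.1) (pvDiffWitness_format_grouped_results_as_strings.2.1) (pvDiffWitness_format_grouped_results_as_strings.2.2) = pvDiffWitnessOut_format_grouped_results_as_strings.1 ∧ format_grouped_results_as_strings_alt (pvDiffWitness_format_grouped_results_as_strings.1) (pvDiffWitness_format_grouped_results_as_strings.2.1) (pvDiffWitness_format_grouped_results_as_strings.2.2) = pvDiffWitnessOut_format_grouped_results_as_strings.2 ∧ pvDiffWitnessOut_format_grouped_results_as_strings.1 ≠ pvDiffWitnessOut_format_grouped_results_as_strings.2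

-- ===== LEMMAS AND PROOFS =====

-- the first occurrences of xs that are not already in seen, in order (A's loop modulo cap)
def pvUniqAvoid (seen : PySem.Set String) : List String → List String
  | [] => []
  | s :: xs =>
    if PySem.Set.contains seen s then pvUniqAvoid seen xs
    else s :: pvUniqAvoid (PySem.Set.add seen s) xs

-- B's sieve modulo cap: take the head, filter it out of the tail, recurse
def pvUniqF (fuel : Nat) (xs : List String) : List String :=
  match fuel, xs with
  | _, [] => []
  | 0, _ :: _ => []
  | fuel + 1, h :: t => h :: pvUniqF fuel (t.filter (fun x => x ≠ h))

def pvUniq (xs : List String) : List String := pvUniqF xs.length xs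

-- pvUniqF is fuel-insensitive above xs.length
lemma pvUniqF_nil (f : Nat) : pvUniqF f [] = [] := by
  cases f <;> rfl

lemma pvUniqF_fuel_irrel : ∀ (f1 f2 : Nat) (xs : List String),
    xs.length ≤ f1 → xs.length ≤ f2 → pvUniqF f1 xs = pvUniqF f2 xs := by
  intro f1
  induction f1 with
  | zero =>
    intro f2 xs h1 _
    have : xs = [] := List.eq_nil_of_length_eq_zero (Nat.le_zero.mp h1)
    subst this; rw [pvUniqF_nil, pvUniqF_nil]
  | succ f1 ih =>
    intro f2 xs h1 h2
    match f2, xs with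
    | f2, [] => rw [pvUniqF_nil, pvUniqF_nil]
    | 0, x :: t => simp at h2
    | f2 + 1, x :: t =>
      simp only [pvUniqF]
      have hf := List.length_filter_le (fun y => y ≠ x) t
      simp at h1 h2
      rw [ih f2 _ (by omega) (by omega)]

lemma pvUniq_cons (h : String) (t : List String) :
    pvUniq (h :: t) = h :: pvUniq (t.filter (fun x => x ≠ h)) := by
  simp only [pvUniq, List.length_cons, pvUniqF]
  rw [pvUniqF_fuel_irrel t.length (t.filter (fun x => x ≠ h)).length _
    (List.length_filter_le _ _) le_rfl]

lemma pv_uniqAvoid_eq_uniq_filter (xs : List String) : ∀ seen : PySem.Set String,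
    pvUniqAvoid seen xs = pvUniq (xs.filter (fun x => !PySem.Set.contains seen x)) := by
  induction xs with
  | nil => intro seen; simp [pvUniqAvoid, pvUniq, pvUniqF]
  | cons h t ih =>
    intro seen
    by_cases hm : h ∈ seen
    · simp [pvUniqAvoid, hm, ih seen]
    · have hfilters : (t.filter (fun x => !PySem.Set.contains seen x)).filter (fun x => x ≠ h)
          = t.filter (fun x => !PySem.Set.contains (PySem.Set.add seen h) x) := by
        rw [List.filter_filter]
        apply List.filter_congr
        intro x _
        by_cases hx : x = h
        · subst hx
          simp [PySem.Set.mem_add]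
        · simp [PySem.Set.mem_add, hx]
      have hstep : pvUniqAvoid seen (h :: t) = h :: pvUniqAvoid (PySem.Set.add seen h) t := by
        simp [pvUniqAvoid, hm]
      have hcons : (h :: t).filter (fun x => !PySem.Set.contains seen x)
          = h :: t.filter (fun x => !PySem.Set.contains seen x) := by
        simp [hm]
      rw [hstep, ih (PySem.Set.add seen h), hcons, pvUniq_cons, hfilters]

lemma pv_bloopF_eq_take (k : Int) : ∀ (fuel : Nat) (pending : List String),
    pending.length ≤ fuel → ∀ picked : List String,
    pvBLoopF fuel k picked pending = picked ++ (pvUniq pending).take (k.toNat - picked.length) := by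
  intro fuel
  induction fuel with
  | zero =>
    intro pending hlen picked
    have : pending = [] := List.eq_nil_of_length_eq_zero (Nat.le_zero.mp hlen)
    subst this; simp [pvBLoopF, pvUniq, pvUniqF]
  | succ n ih =>
    intro pending hlen picked
    match pending with
    | [] => simp [pvBLoopF, pvUniq, pvUniqF]
    | h :: t =>
      by_cases hk : (picked.length : Int) < k
      · have hlt : (t.filter (fun x => x ≠ h)).length ≤ n := by
          have := List.length_filter_le (fun x => x ≠ h) t
          simp at hlen; omega
        have hn : k.toNat - picked.length = (k.toNat - (picked ++ [h]).length) + 1 := by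
          simp; omega
        rw [show pvBLoopF (n + 1) k picked (h :: t)
            = pvBLoopF n k (picked ++ [h]) (t.filter (fun x => x ≠ h)) by
          simp [pvBLoopF, hk]]
        rw [ih _ hlt (picked ++ [h]), hn, pvUniq_cons]
        simp [List.take_succ_cons]
      · have h0 : k.toNat - picked.length = 0 := by omega
        rw [show pvBLoopF (n + 1) k picked (h :: t) = picked by simp [pvBLoopF, hk]]
        simp [h0]

lemma pv_bloop_eq_take (k : Int) (pending picked : List String) :
    pvBLoop k picked pending = picked ++ (pvUniq pending).take (k.toNat - picked.length) :=
  pv_bloopF_eq_take k pending.length pending le_rfl picked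

-- A's per-key accumulate-with-break equals take of the uncapped uniqAvoid (for 1 ≤ cap)
lemma pv_aloop_eq (maxI maxL : Int) : ∀ (rows : List (List (String × String)))
    (acc : List String) (seen : PySem.Set String), (acc.length : Int) < maxI →
    pvALoop maxI maxL rows acc seen
      = acc ++ (pvUniqAvoid seen (rows.map (fun r => pvFormatRow r maxL))).take
          (maxI.toNat - acc.length) := by
  intro rows
  induction rows with
  | nil => intro acc seen _; simp [pvALoop, pvUniqAvoid]
  | cons r rest ih =>
    intro acc seen h
    by_cases hmem : pvFormatRow r maxL ∈ seen
    · have hbr : ¬ maxI ≤ (acc.length : Int) := by omega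
      have hstep : pvALoop maxI maxL (r :: rest) acc seen
          = pvALoop maxI maxL rest acc seen := by
        simp [pvALoop, hmem, hbr]
      rw [hstep, ih acc seen h]
      simp [pvUniqAvoid, hmem]
    · by_cases hbr : maxI ≤ (acc.length : Int) + 1
      · have hstep : pvALoop maxI maxL (r :: rest) acc seen
            = acc ++ [pvFormatRow r maxL] := by
          simp [pvALoop, hmem]
          exact fun hlt => absurd hbr (by omega)
        have hn : maxI.toNat - acc.length = 1 := by omega
        rw [hstep]
        simp [pvUniqAvoid, hmem, hn]
      · have hstep : pvALoop maxI maxL (r :: rest) acc seen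
            = pvALoop maxI maxL rest (acc ++ [pvFormatRow r maxL])
                (PySem.Set.add seen (pvFormatRow r maxL)) := by
          simp [pvALoop, hmem]
          exact fun hle => absurd hle hbr
        have h' : (((acc ++ [pvFormatRow r maxL]).length : Int)) < maxI := by
          simp; omega
        rw [hstep, ih _ _ h']
        have hs : maxI.toNat - acc.length = (maxI.toNat - (acc ++ [pvFormatRow r maxL]).length) + 1 := by
          simp; omega
        rw [hs]
        simp [pvUniqAvoid, hmem, List.take_succ_cons]

-- the per-key values agree whenever 1 ≤ max_items_per_port
lemma pv_key_eq (maxI maxL : Int) (h1 : 1 ≤ maxI) (rows : List (List (String × String))) :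
    pvALoop maxI maxL rows [] PySem.Set.empty
      = pvBLoop maxI [] (rows.map (fun r => pvFormatRow r maxL)) := by
  rw [pv_aloop_eq maxI maxL rows [] PySem.Set.empty (by simpa using h1)]
  rw [pv_bloop_eq_take maxI (rows.map (fun r => pvFormatRow r maxL)) []]
  rw [pv_uniqAvoid_eq_uniq_filter]
  simp [PySem.Set.empty, PySem.Set.contains]

-- ===== VERDICT (by name: the statement is the Claim_ definition above) =====
theorem format_grouped_results_as_strings_spec : Claim_unchanged_format_grouped_results_as_strings := by
  intro grouped maxI maxL _ hnd
  unfold format_grouped_results_as_strings format_grouped_results_as_strings_alt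
  congr 1
  apply PySem.List.foldl_congr_mem
  intro out kv hmem
  by_cases h1 : 1 ≤ maxI
  · rw [pv_key_eq maxI maxL h1 kv.2]
  · have hrows : kv.2 = [] := by
      by_contra hne
      exact hnd ⟨by omega, kv, hmem, hne⟩
    rw [hrows]
    simp [pvALoop, pvBLoop, pvBLoopF]

theorem format_grouped_results_as_strings_changed : Claim_changed_format_grouped_results_as_strings := by
  unfold Claim_changed_format_grouped_results_as_strings; decide
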